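-- pv_equiv track=rewrite | github.com/trevorgrayson/blunt | clients/github/__init__.py | review_status_icon
-- ===== SOURCE A (Python) =====
-- def review_status_icon(reviews):
--     states = [r["state"] for r in reviews]
--     if "CHANGES_REQUESTED" in states:
--         return "❌"
--     elif "COMMENTED" in states:
--         return "💬"
--     elif "APPROVED" in states:
--         return "✅"
--     return "⚪"
-- ===== SOURCE B (Python) =====
-- _RANK = {"CHANGES_REQUESTED": 0, "COMMENTED": 1, "APPROVED": 2}
-- _ICONS = ["❌", "💬", "✅"]
--
--
-- def review_status_icon(reviews):
--     best = 3
--     for r in reviews: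
--         rank = _RANK.get(r["state"], 3)
--         if rank < best:
--             best = rank
--     return _ICONS[best] if best < 3 else "⚪"
-- ===== Notes on version B (the rewrite author's own statement) =====
-- stated objective: alternative
-- what changed: Replaces A's build-a-states-list plus three sequential membership scans with a single fold over the reviews that keeps the minimum priority rank (CHANGES_REQUESTED:0, COMMENTED:1, APPROVED:2) and indexes a rank-to-icon table at the end.
import Mathlib
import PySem

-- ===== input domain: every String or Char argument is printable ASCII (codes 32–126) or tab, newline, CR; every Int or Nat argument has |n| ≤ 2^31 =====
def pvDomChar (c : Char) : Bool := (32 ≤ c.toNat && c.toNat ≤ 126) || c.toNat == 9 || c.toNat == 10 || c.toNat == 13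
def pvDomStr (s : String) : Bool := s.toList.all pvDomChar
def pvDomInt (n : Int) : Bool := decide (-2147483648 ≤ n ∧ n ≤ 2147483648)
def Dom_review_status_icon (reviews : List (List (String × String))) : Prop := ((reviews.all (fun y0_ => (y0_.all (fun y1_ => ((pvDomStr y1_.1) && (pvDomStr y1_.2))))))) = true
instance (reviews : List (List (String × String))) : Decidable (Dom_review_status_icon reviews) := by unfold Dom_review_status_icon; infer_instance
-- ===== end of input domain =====

-- B replaces A's three membership scans over the states list by one min-rank fold over the
-- reviews (objective: alternative single-pass decomposition; same return value on Pre_).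

-- ===== PORT A =====
-- r["state"] : Python dict lookup; the dict argument is the association list r (last value
-- for a duplicated key wins, as in Python dict construction): PySem.Dict.ofList then get?.
-- Pre_ guarantees the key is present, so the .getD "" default is never taken on claimed inputs.
def pvState (r : List (String × String)) : String :=
  ((PySem.Dict.ofList r).get? "state").getD ""

def review_status_icon (reviews : List (List (String × String))) : String :=
  let states := reviews.map pvState
  if states.contains "CHANGES_REQUESTED" then "❌"
  else if states.contains "COMMENTED" then "💬"
  else if states.contains "APPROVED" then "✅"
  else "⚪"

-- ===== PORT B =====
-- _RANK.get(s, 3) for the three-entry literal dict: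
def pvRank (s : String) : Nat :=
  if s = "CHANGES_REQUESTED" then 0
  else if s = "COMMENTED" then 1
  else if s = "APPROVED" then 2
  else 3

-- the final '_ICONS[best] if best < 3 else "⚪"' expression:
def pvIcon (best : Nat) : String :=
  if best < 3 then ["❌", "💬", "✅"].getD best "⚪" else "⚪"

def review_status_icon_alt (reviews : List (List (String × String))) : String :=
  pvIcon (reviews.foldl (fun b r =>
    if pvRank (pvState r) < b then pvRank (pvState r) else b) 3)

-- ===== PRECONDITION & SPEC =====
-- Pre_ excludes exactly the inputs where some review lacks the "state" key, on which
-- Python A raises KeyError (and Python B raises KeyError too).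
def Pre_review_status_icon (reviews : List (List (String × String))) : Prop :=
  (reviews.all (fun r => r.any (fun p => p.1 == "state"))) = true
instance (reviews : List (List (String × String))) : Decidable (Pre_review_status_icon reviews) := by
  unfold Pre_review_status_icon; infer_instance

def pvWitness_review_status_icon : (List (List (String × String))) :=
  [[("state", "APPROVED")], [("state", "COMMENTED"), ("id", "7")]]

def Spec_review_status_icon (reviews : List (List (String × String))) (out : String) : Prop := out = review_status_icon_alt reviews
instance (reviews : List (List (String × String))) (out : String) : Decidable (Spec_review_status_icon reviews out) := by unfold Spec_review_status_icon; infer_instance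

-- ===== CLAIM (what is proved, stated in full; the proofs are below) =====
def Claim_equal_review_status_icon : Prop := ∀ (reviews : List (List (String × String))), Dom_review_status_icon reviews → Pre_review_status_icon reviews → Spec_review_status_icon reviews (review_status_icon reviews)

-- ===== LEMMAS AND PROOFS =====

-- A's if-chain over membership, as the rank it selects.
def pvChain (L : List String) : Nat :=
  if L.contains "CHANGES_REQUESTED" then 0
  else if L.contains "COMMENTED" then 1
  else if L.contains "APPROVED" then 2
  else 3

lemma pvChain_le (L : List String) : pvChain L ≤ 3 := by
  unfold pvChain; split_ifs <;> omega

lemma pvChain_cons (s : String) (L : List String) :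
    pvChain (s :: L) = min (pvRank s) (pvChain L) := by
  by_cases h1 : s = "CHANGES_REQUESTED" <;>
  by_cases h2 : s = "COMMENTED" <;>
  by_cases h3 : s = "APPROVED" <;>
  by_cases c1 : "CHANGES_REQUESTED" ∈ L <;>
  by_cases c2 : "COMMENTED" ∈ L <;>
  by_cases c3 : "APPROVED" ∈ L <;>
  simp [pvChain, pvRank, h1, h2, h3, c1, c2, c3, eq_comm]

lemma pvFold_eq_chain (L : List String) (b : Nat) (hb : b ≤ 3) :
    L.foldl (fun b s => if pvRank s < b then pvRank s else b) b
      = min b (pvChain L) := by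
  induction L generalizing b with
  | nil => simp [pvChain]; omega
  | cons s L ih =>
      have hstep : (if pvRank s < b then pvRank s else b) = min (pvRank s) b := by
        split_ifs <;> omega
      rw [List.foldl_cons, ih _ (by rw [hstep]; omega), hstep, pvChain_cons]
      omega

lemma pvMain (L : List String) :
    (if L.contains "CHANGES_REQUESTED" then "❌"
     else if L.contains "COMMENTED" then "💬"
     else if L.contains "APPROVED" then "✅"
     else "⚪")
    = pvIcon (L.foldl (fun b s => if pvRank s < b then pvRank s else b) 3) := by
  rw [pvFold_eq_chain L 3 (le_refl 3)]
  have h3 : min 3 (pvChain L) = pvChain L := by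
    have := pvChain_le L; omega
  rw [h3]
  unfold pvChain pvIcon
  split_ifs <;> simp_all

-- ===== VERDICT (by name: the statement is the Claim_ definition above) =====
theorem review_status_icon_spec : Claim_equal_review_status_icon := by
  intro reviews _ _
  show review_status_icon reviews = review_status_icon_alt reviews
  have h : reviews.foldl (fun b r =>
      if pvRank (pvState r) < b then pvRank (pvState r) else b) 3
      = (reviews.map pvState).foldl (fun b s => if pvRank s < b then pvRank s else b) 3 := by
    rw [List.foldl_map]
  unfold review_status_icon review_status_icon_alt
  rw [h]
  exact pvMain (reviews.map pvState)
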